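-- pv_equiv track=rewrite | github.com/Yale-PROCTOR/agentic-translation | mutate.py | mutated_lists
-- ===== SOURCE A (Python) =====
-- def mutated_lists(values: list[str]) -> list[list[str]]:
--     return [
--         values[:index] + values[index + 1 :]
--         for index in range(len(values))
--     ] + [
--         [*values, "a"]
--     ] + [
--         values[:index] + [values[index + 1], values[index]] + values[index + 2 :]
--         for index in range(len(values) - 1)
--     ]
-- ===== SOURCE B (Python) =====
-- def mutated_lists(values: list[str]) -> list[list[str]]:
--     # one pass over the list, maintaining the prefix incrementally and
--     # producing the deletion and swap groups simultaneously
--     dels = []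
--     swaps = []
--     prefix = []
--     suffix = list(values)
--     while suffix:
--         head = suffix[0]
--         suffix = suffix[1:]
--         dels.append(prefix + suffix)
--         if suffix:
--             swaps.append(prefix + [suffix[0], head] + suffix[1:])
--         prefix.append(head)
--     return dels + [values + ["a"]] + swaps
-- ===== Notes on version B (the rewrite author's own statement) =====
-- stated objective: alternative
-- what changed: Replaces the three index-driven slice-and-concatenate comprehensions by a single pass that walks the list once, maintains the prefix incrementally, and emits both the deletion group and the swap group from the same loop.
import Mathlib
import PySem

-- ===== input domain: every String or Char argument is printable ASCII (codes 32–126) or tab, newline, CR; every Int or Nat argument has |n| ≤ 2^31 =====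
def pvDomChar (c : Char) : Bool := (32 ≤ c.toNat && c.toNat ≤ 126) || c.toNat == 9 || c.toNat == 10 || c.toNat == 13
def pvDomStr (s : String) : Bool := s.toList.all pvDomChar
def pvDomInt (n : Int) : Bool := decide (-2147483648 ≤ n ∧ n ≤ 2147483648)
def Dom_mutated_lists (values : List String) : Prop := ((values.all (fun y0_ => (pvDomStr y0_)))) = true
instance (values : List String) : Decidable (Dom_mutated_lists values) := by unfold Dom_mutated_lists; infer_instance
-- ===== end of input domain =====

-- B replaces the three index/slice comprehensions by ONE pass that keeps an incremental prefix/suffix and emits the deletion and swap groups together (objective: alternative decomposition).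

-- ===== PORT A =====
-- literal transliteration of A's three comprehensions (slices and indexing via PySem; indices are always in range)
def mutated_lists (values : List String) : List (List String) :=
  ((PySem.List.pyRange 0 (values.length : Int) 1).map (fun index =>
      PySem.List.slice values none (some index) ++ PySem.List.slice values (some (index + 1)) none))
  ++ [values ++ ["a"]]
  ++ ((PySem.List.pyRange 0 ((values.length : Int) - 1) 1).map (fun index =>
      PySem.List.slice values none (some index)
        ++ [PySem.List.pyGetD values (index + 1) "", PySem.List.pyGetD values index ""]
        ++ PySem.List.slice values (some (index + 2)) none))

-- ===== PORT B =====
-- B-side helper: the while-loop of Source B as structural recursion on suffix,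
-- carrying (prefix, dels, swaps) exactly as Source B does
def pvLoop (pre suffix : List String) (dels swaps : List (List String)) :
    (List (List String)) × (List (List String)) :=
  match suffix with
  | [] => (dels, swaps)
  | head :: suffix' =>
      let dels' := dels ++ [pre ++ suffix']
      let swaps' :=
        match suffix' with
        | [] => swaps
        | s0 :: rest => swaps ++ [pre ++ [s0, head] ++ rest]
      pvLoop (pre ++ [head]) suffix' dels' swaps'

def mutated_lists_alt (values : List String) : List (List String) :=
  let r := pvLoop [] values [] []
  r.1 ++ [values ++ ["a"]] ++ r.2

-- ===== PRECONDITION & SPEC =====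
def Spec_mutated_lists (values : List String) (out : List (List String)) : Prop := out = mutated_lists_alt values
instance (values : List String) (out : List (List String)) : Decidable (Spec_mutated_lists values out) := by unfold Spec_mutated_lists; infer_instance

-- ===== CLAIM (what is proved, stated in full; the proofs are below) =====
def Claim_equal_mutated_lists : Prop := ∀ (values : List String), Dom_mutated_lists values → Spec_mutated_lists values (mutated_lists values)

-- ===== LEMMAS AND PROOFS =====

-- proof-side recursive characterisations of the two groups
def pvDels (xs : List String) : List (List String) :=
  match xs with
  | [] => []
  | head :: tail => tail :: (pvDels tail).map (fun d => head :: d)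

def pvSwaps (xs : List String) : List (List String) :=
  match xs with
  | head :: y :: rest => (y :: head :: rest) :: (pvSwaps (y :: rest)).map (fun s => head :: s)
  | _ => []

-- invariant of Source B's loop
theorem pvLoop_spec (suffix : List String) : ∀ (pre : List String) (dels swaps : List (List String)),
    pvLoop pre suffix dels swaps =
      (dels ++ (pvDels suffix).map (fun d => pre ++ d),
       swaps ++ (pvSwaps suffix).map (fun s => pre ++ s)) := by
  induction suffix with
  | nil => intro pre dels swaps; simp [pvLoop, pvDels, pvSwaps]
  | cons head suffix' ih =>
    intro pre dels swaps
    cases suffix' with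
    | nil => simp [pvLoop, pvDels, pvSwaps]
    | cons s0 rest =>
      rw [show pvLoop pre (head :: s0 :: rest) dels swaps =
            pvLoop (pre ++ [head]) (s0 :: rest) (dels ++ [pre ++ (s0 :: rest)])
              (swaps ++ [pre ++ [s0, head] ++ rest]) from rfl, ih]
      simp [pvDels, pvSwaps, List.map_map, Function.comp_def]

-- A's deletion comprehension, in take/drop form, equals B's recursive dels
theorem pvDels_eq (xs : List String) :
    (List.range xs.length).map (fun k => xs.take k ++ xs.drop (k + 1)) = pvDels xs := by
  induction xs with
  | nil => simp [pvDels]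
  | cons x tail ih =>
    simp [pvDels, List.range_succ_eq_map, List.map_map, Function.comp_def, ← ih]

-- A's swap comprehension, in take/getD/drop form, equals B's recursive swaps
theorem pvSwaps_eq (xs : List String) :
    (List.range (xs.length - 1)).map (fun k =>
        xs.take k ++ [xs.getD (k + 1) "", xs.getD k ""] ++ xs.drop (k + 2)) = pvSwaps xs := by
  induction xs with
  | nil => simp [pvSwaps]
  | cons x tail ih =>
    cases tail with
    | nil => simp [pvSwaps]
    | cons y rest =>
      simp only [pvSwaps, List.length_cons, Nat.add_sub_cancel, List.range_succ_eq_map,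
        List.map_cons, List.map_map, Function.comp_def] at *
      refine congrArg₂ _ (by simp) ?_
      rw [← ih]
      simp

-- cast helper for the Int-indexed lookups inside the maps
theorem pv_pyGetD_succ (xs : List String) (k : Nat) :
    PySem.List.pyGetD xs ((k : Int) + 1) "" = xs.getD (k + 1) "" := by
  rw [show ((k : Int) + 1) = ((k + 1 : Nat) : Int) by push_cast; ring,
    PySem.List.pyGetD_natCast]

-- ===== VERDICT (by name: the statement is the Claim_ definition above) =====
theorem mutated_lists_spec : Claim_equal_mutated_lists := by
  intro values _
  show mutated_lists values = mutated_lists_alt values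
  match values with
  | [] => decide
  | v :: vs =>
  rw [show mutated_lists_alt (v :: vs) = pvDels (v :: vs) ++ [(v :: vs) ++ ["a"]] ++ pvSwaps (v :: vs) by
    simp [mutated_lists_alt, pvLoop_spec]]
  unfold mutated_lists
  have hlen : (((v :: vs).length : Int) - 1) = (((v :: vs).length - 1 : Nat) : Int) := by
    simp
  rw [hlen, PySem.List.pyRange_zero_natCast, PySem.List.pyRange_zero_natCast,
    List.map_map, List.map_map]
  refine congrArg₂ _ (congrArg₂ _ ?_ rfl) ?_
  · rw [← pvDels_eq]
    refine List.map_congr_left fun k _ => ?_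
    simp [PySem.List.slice_to_natCast]
    rw [show ((k : Int) + 1) = ((k + 1 : Nat) : Int) by push_cast; ring,
      PySem.List.slice_from_natCast]
    simp
  · rw [← pvSwaps_eq]
    refine List.map_congr_left fun k _ => ?_
    simp [PySem.List.slice_to_natCast, pv_pyGetD_succ,
      PySem.List.pyGetD_natCast]
    rw [show ((k : Int) + 2) = ((k + 2 : Nat) : Int) by push_cast; ring,
      PySem.List.slice_from_natCast]
    simp
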